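-- pv_equiv track=rewrite | github.com/akshitparmar444/Synapse_Task | pp2.py | lumos
-- ===== SOURCE A (Python) =====
-- def lumos(runes:str) -> int:
--     required = ("lumos")
--     added = set()
--     count=0
--     for ch in runes:
--         ch_lower=ch.lower()
--         count=count+1
--         if ch_lower in required:
--             added.add(ch_lower)
--             if len(added)==5:
--                 return count
--
--     return -1
-- ===== SOURCE B (Python) =====
-- def lumos(runes: str) -> int:
--     best = 0
--     for letter in "lumos":
--         pos = -1
--         for i, ch in enumerate(runes):
--             if ch.lower() == letter:
--                 pos = i
--                 break
--         if pos == -1: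
--             return -1
--         best = max(best, pos)
--     return best + 1
-- ===== Notes on version B (the rewrite author's own statement) =====
-- stated objective: alternative
-- what changed: Replaces the single early-exit scan that accumulates a set of collected letters with a per-letter decomposition: for each of the five required letters find its first occurrence index, return -1 if any is missing, else 1 + the maximum of those indices.
import Mathlib
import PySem

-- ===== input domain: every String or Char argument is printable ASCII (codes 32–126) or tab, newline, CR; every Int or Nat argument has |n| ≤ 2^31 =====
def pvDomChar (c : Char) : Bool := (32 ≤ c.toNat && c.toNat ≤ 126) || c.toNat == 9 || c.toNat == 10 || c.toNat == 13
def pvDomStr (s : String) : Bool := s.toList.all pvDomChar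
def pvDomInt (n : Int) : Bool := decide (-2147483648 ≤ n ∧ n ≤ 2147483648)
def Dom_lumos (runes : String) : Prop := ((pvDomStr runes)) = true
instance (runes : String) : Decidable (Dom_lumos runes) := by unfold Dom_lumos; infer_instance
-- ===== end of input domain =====

-- B replaces A's single early-exit scan with a set accumulator by five independent
-- first-occurrence searches combined with a max (objective: alternative decomposition).

-- ===== PORT A =====
-- the loop 'for ch in runes: …' with early return, state (added, count)
def lumosGo : List Char → PySem.Set Char → Int → Int
  | [], _, _ => -1
  | c :: rest, added, count =>
    let chLower := PySem.Chars.lowerChar c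
    let count' := count + 1
    if ("lumos".toList).contains chLower then
      let added' := PySem.Set.add added chLower
      if PySem.Set.len added' = 5 then count'
      else lumosGo rest added' count'
    else lumosGo rest added count'

def lumos (runes : String) : Int := lumosGo runes.toList PySem.Set.empty 0

-- ===== PORT B =====
-- the inner 'for i, ch in enumerate(runes): … break' = index of first matching char
def lumosFindPos (l : List Char) (letter : Char) : Option Nat :=
  l.findIdx? (fun ch => PySem.Chars.lowerChar ch == letter)

-- the outer loop 'for letter in "lumos"', accumulator best
def lumosAltGo (l : List Char) : List Char → Nat → Int
  | [], best => (best : Int) + 1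
  | letter :: rest, best =>
    match lumosFindPos l letter with
    | none => -1
    | some p => lumosAltGo l rest (max best p)

def lumos_alt (runes : String) : Int := lumosAltGo runes.toList "lumos".toList 0

-- ===== PRECONDITION & SPEC =====
def Spec_lumos (runes : String) (out : Int) : Prop := out = lumos_alt runes
instance (runes : String) (out : Int) : Decidable (Spec_lumos runes out) := by unfold Spec_lumos; infer_instance

-- ===== CLAIM (what is proved, stated in full; the proofs are below) =====
def Claim_equal_lumos : Prop := ∀ (runes : String), Dom_lumos runes → Spec_lumos runes (lumos runes)

-- ===== LEMMAS AND PROOFS =====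

-- common characterisation: max over the still-missing letters S of their first index in l
def maxF (l : List Char) : List Char → Option Nat
  | [] => some 0
  | c :: S =>
    match lumosFindPos l c, maxF l S with
    | some i, some m => some (max i m)
    | _, _ => none

theorem findPos_cons (c : Char) (rest : List Char) (d : Char) :
    lumosFindPos (c :: rest) d =
      if PySem.Chars.lowerChar c == d then some 0
      else (lumosFindPos rest d).map (· + 1) := by
  simp [lumosFindPos, List.findIdx?_cons]

theorem maxF_cons (l : List Char) (c : Char) (S : List Char) :
    maxF l (c :: S) =
      match lumosFindPos l c, maxF l S with
      | some i, some m => some (max i m)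
      | _, _ => none := rfl

-- L1: no letter of S matches the head char
theorem maxF_cons_notmem (c : Char) (rest : List Char) :
    ∀ S : List Char, S ≠ [] → (∀ d ∈ S, PySem.Chars.lowerChar c ≠ d) →
      maxF (c :: rest) S = (maxF rest S).map (· + 1)
  | [], h, _ => absurd rfl h
  | [d], _, hd => by
    have hb : (PySem.Chars.lowerChar c == d) = false := by
      simp [hd d (by simp)]
    rw [maxF_cons, maxF_cons, findPos_cons]
    cases h : lumosFindPos rest d with
    | none => simp [hb, h, maxF]
    | some p => simp [hb, h, maxF]
  | d :: d' :: S, _, hd => by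
    have ih := maxF_cons_notmem c rest (d' :: S) (by simp)
      (fun x hx => hd x (List.mem_cons_of_mem _ hx))
    have hb : (PySem.Chars.lowerChar c == d) = false := by
      simp [hd d (by simp)]
    rw [maxF_cons (c :: rest) d (d' :: S), ih, maxF_cons rest d (d' :: S), findPos_cons]
    cases h : lumosFindPos rest d with
    | none => cases hm : maxF rest (d' :: S) <;> simp [hb, h, hm]
    | some p =>
      cases hm : maxF rest (d' :: S) with
      | none => simp [hb, h, hm]
      | some m => simp [hb, h, hm]

-- L2: the head char's lowercase is in S, and removing it leaves S nonempty
theorem maxF_cons_mem (c : Char) (rest : List Char) :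
    ∀ S : List Char, S.Nodup → PySem.Chars.lowerChar c ∈ S → S.erase (PySem.Chars.lowerChar c) ≠ [] →
      maxF (c :: rest) S = (maxF rest (S.erase (PySem.Chars.lowerChar c))).map (· + 1)
  | [], _, hm, _ => absurd hm (by simp)
  | d :: S, hnd, hm, hne => by
    by_cases hcd : PySem.Chars.lowerChar c = d
    · subst hcd
      have hS : PySem.Chars.lowerChar c ∉ S := (List.nodup_cons.mp hnd).1
      have herase : (PySem.Chars.lowerChar c :: S).erase (PySem.Chars.lowerChar c) = S := by
        simp [List.erase_cons]
      rw [herase] at hne ⊢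
      have hnm : ∀ x ∈ S, PySem.Chars.lowerChar c ≠ x := fun x hx h => hS (h ▸ hx)
      rw [maxF_cons, findPos_cons, maxF_cons_notmem c rest S hne hnm]
      cases hm : maxF rest S with
      | none => simp [hm]
      | some m => simp [hm]
    · have hm' : PySem.Chars.lowerChar c ∈ S := by
        cases List.mem_cons.mp hm with
        | inl h => exact absurd h hcd
        | inr h => exact h
      have herase : (d :: S).erase (PySem.Chars.lowerChar c) = d :: S.erase (PySem.Chars.lowerChar c) := by
        rw [List.erase_cons_tail]
        simp
        exact Ne.symm hcd
      rw [herase]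
      have hdb : (PySem.Chars.lowerChar c == d) = false := by simp [hcd]
      by_cases hSe : S.erase (PySem.Chars.lowerChar c) = []
      · -- then S = [lower c]
        have hSeq : S = [PySem.Chars.lowerChar c] := by
          have hnd' := (List.nodup_cons.mp hnd).2
          cases S with
          | nil => simp at hm'
          | cons e S' =>
            by_cases hce : PySem.Chars.lowerChar c = e
            · subst hce
              simp [List.erase_cons] at hSe
              simp [hSe]
            · rw [List.erase_cons_tail] at hSe
              · simp at hSe
              · simp only [ne_eq, beq_iff_eq]
                exact fun hq => hce hq.symm
        subst hSeq
        rw [hSe]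
        rw [maxF_cons (c :: rest) d [PySem.Chars.lowerChar c],
          maxF_cons (c :: rest) (PySem.Chars.lowerChar c) [],
          maxF_cons rest d [], findPos_cons, findPos_cons]
        cases h : lumosFindPos rest d with
        | none => simp [hdb, h, maxF]
        | some p => simp [hdb, h, maxF]
      · have ih := maxF_cons_mem c rest S (List.nodup_cons.mp hnd).2 hm' hSe
        rw [maxF_cons (c :: rest) d S, ih,
          maxF_cons rest d (S.erase (PySem.Chars.lowerChar c)), findPos_cons]
        cases h : lumosFindPos rest d with
        | none => cases hm : maxF rest (S.erase (PySem.Chars.lowerChar c)) <;> simp [hdb, h, hm]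
        | some p =>
          cases hm : maxF rest (S.erase (PySem.Chars.lowerChar c)) with
          | none => simp [hdb, h, hm]
          | some m => simp [hdb, h, hm]

-- A-side: the early-exit loop computes count + maxF + 1 over the missing letters
theorem lumosGo_eq (l : List Char) : ∀ (S : List Char) (added : List Char) (count : Int),
    S ≠ [] → S.Sublist ("lumos".toList) →
    (∀ x ∈ ("lumos".toList), (x ∈ S ↔ x ∉ added)) →
    added.length + S.length = 5 →
    lumosGo l added count =
      match maxF l S with
      | some m => count + (m + 1 : Nat)
      | none => -1 := by
  induction l with
  | nil =>
    intro S added count hne _ _ _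
    cases S with
    | nil => exact absurd rfl hne
    | cons d S =>
      simp [lumosGo, maxF, lumosFindPos]
  | cons c rest ih =>
    intro S added count hne hsub hiff hlen
    have hndS : S.Nodup := hsub.nodup (by decide)
    simp only [lumosGo]
    by_cases hmemL : PySem.Chars.lowerChar c ∈ "lumos".toList
    · rw [if_pos (by simpa using hmemL)]
      by_cases hmemA : PySem.Chars.lowerChar c ∈ added
      · -- already collected: set unchanged
        have hadd : PySem.Set.add added (PySem.Chars.lowerChar c) = added := by
          simp [PySem.Set.add, List.contains_eq_mem, hmemA]
        rw [hadd]
        have hnotS : PySem.Chars.lowerChar c ∉ S := fun h => ((hiff _ hmemL).mp h) hmemA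
        have hS1 : 1 ≤ S.length := by cases S; exact absurd rfl hne; simp
        rw [if_neg (by simp only [PySem.Set.len]; push_cast; omega)]
        rw [ih S added (count + 1) hne hsub hiff hlen]
        rw [maxF_cons_notmem c rest S hne (fun d hd h => hnotS (h ▸ hd))]
        cases hm : maxF rest S with
          | none => simp [hm]
          | some m => simp [hm]; ring
      · -- new letter
        have hmemS : PySem.Chars.lowerChar c ∈ S := (hiff _ hmemL).mpr hmemA
        have hadd : PySem.Set.add added (PySem.Chars.lowerChar c) = added ++ [PySem.Chars.lowerChar c] := by
          simp [PySem.Set.add, List.contains_eq_mem, hmemA]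
        rw [hadd]
        have hlenE : (S.erase (PySem.Chars.lowerChar c)).length = S.length - 1 :=
          List.length_erase_of_mem hmemS
        by_cases hSe : S.erase (PySem.Chars.lowerChar c) = []
        · -- last missing letter: S = [lower c], loop returns count+1
          have hS1 : S.length = 1 := by
            have := hlenE; rw [hSe] at this
            have h0 : S.length - 1 = 0 := by simpa using this.symm
            have h1 : 1 ≤ S.length := by cases S; exact absurd rfl hne; simp
            omega
          have hSeq : S = [PySem.Chars.lowerChar c] := by
            cases S with
            | nil => simp at hS1
            | cons e S' =>
              simp at hS1
              subst hS1
              simp at hmemS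
              simp [hmemS]
          subst hSeq
          simp only [List.length_cons, List.length_nil] at hlen
          rw [if_pos (by simp [PySem.Set.len]; push_cast; omega)]
          simp [maxF, findPos_cons]
        · have hSne' : 2 ≤ S.length := by
            by_contra hlt2
            push_neg at hlt2
            have h1 : 1 ≤ S.length := by cases S; exact absurd rfl hne; simp
            have hS1 : S.length = 1 := by omega
            rw [List.length_eq_one_iff] at hS1
            obtain ⟨a, ha⟩ := hS1
            subst ha
            simp at hmemS
            exact hSe (by simp [hmemS])
          rw [if_neg (by simp [PySem.Set.len]; push_cast; omega)]
          have hiff' : ∀ x ∈ ("lumos".toList),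
              (x ∈ S.erase (PySem.Chars.lowerChar c) ↔ x ∉ added ++ [PySem.Chars.lowerChar c]) := by
            intro x hx
            rw [hndS.mem_erase_iff]
            constructor
            · rintro ⟨hxc, hxS⟩
              simp only [List.mem_append, List.mem_singleton]
              rintro (h | h)
              · exact ((hiff x hx).mp hxS) h
              · exact hxc h
            · intro h
              simp only [List.mem_append, List.mem_singleton] at h
              push_neg at h
              exact ⟨h.2, (hiff x hx).mpr h.1⟩
          have := ih (S.erase (PySem.Chars.lowerChar c)) (added ++ [PySem.Chars.lowerChar c])
            (count + 1) hSe ((List.erase_sublist).trans hsub) hiff' (by simp [hlenE]; omega)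
          rw [this, maxF_cons_mem c rest S hndS hmemS hSe]
          cases hm : maxF rest (S.erase (PySem.Chars.lowerChar c)) with
          | none => simp [hm]
          | some m => simp [hm]; ring
    · rw [if_neg (by simpa using hmemL)]
      have hnotS : PySem.Chars.lowerChar c ∉ S := fun h => hmemL (hsub.mem h)
      rw [ih S added (count + 1) hne hsub hiff hlen]
      rw [maxF_cons_notmem c rest S hne (fun d hd h => hnotS (h ▸ hd))]
      cases hm : maxF rest S with
          | none => simp [hm]
          | some m => simp [hm]; ring

-- B-side: the per-letter loop computes (max best (maxF)) + 1
theorem lumosAltGo_eq (l : List Char) : ∀ (S : List Char) (best : Nat),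
    lumosAltGo l S best =
      match maxF l S with
      | some m => ((max best m : Nat) : Int) + 1
      | none => -1
  | [], best => by simp [lumosAltGo, maxF]
  | c :: S, best => by
    simp only [lumosAltGo, maxF]
    cases h : lumosFindPos l c with
    | none => simp
    | some p =>
      cases hm : maxF l S with
      | none => simp [lumosAltGo_eq l S (max best p), hm]
      | some m =>
        simp [lumosAltGo_eq l S (max best p), hm]

-- ===== VERDICT (by name: the statement is the Claim_ definition above) =====
theorem lumos_spec : Claim_equal_lumos := by
  intro runes _
  show lumos runes = lumos_alt runes
  unfold lumos lumos_alt
  rw [lumosGo_eq runes.toList ("lumos".toList) PySem.Set.empty 0 (by decide)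
    (List.Sublist.refl _)
    (by intro x hx; exact Iff.intro (fun _ h => List.not_mem_nil h) (fun _ => hx))
    (by decide)]
  rw [lumosAltGo_eq runes.toList ("lumos".toList) 0]
  cases hm : maxF runes.toList ("lumos".toList) with
  | none => simp [hm]
  | some m => simp [hm]
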